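-- pv_equiv track=rewrite | github.com/NadavShabta/experiments | compare/success_rate_agents_increase.py | check_ido
-- ===== SOURCE A (Python) =====
-- def check_ido(agents):
--     """
--     Check if the input satisfies Identical-Order Preference (IDO).
--     For each pair of items (i,j), if any agent considers i more costly than j,
--     then all agents must consider i at least as costly as j.
--     """
--     num_items = len(agents[0])
--     for i in range(num_items):
--         for j in range(i + 1, num_items):
--             # Check if any agent considers i more costly than j
--             any_i_more_than_j = any(agent[i] > agent[j] for agent in agents)
--
--             # If any agent considers i more costly than j, check that all agents
--             # consider i at least as costly as j
--             if any_i_more_than_j: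
--                 if not all(agent[i] >= agent[j] for agent in agents):
--                     return False, (i, j)
--
--     return True, None
-- ===== SOURCE B (Python) =====
-- def check_ido(agents):
--     """Single pass over agents per pair with two flags instead of
--     separate any(...) and all(...) scans; returns the same first
--     violating pair in lex order."""
--     num_items = len(agents[0])
--     for i in range(num_items):
--         for j in range(i + 1, num_items):
--             saw_greater = False
--             saw_less = False
--             for agent in agents:
--                 if agent[i] > agent[j]:
--                     saw_greater = True
--                 if agent[i] < agent[j]:
--                     saw_less = True
--                 if saw_greater and saw_less:
--                     return False, (i, j)
--     return True, None
-- ===== Notes on version B (the rewrite author's own statement) =====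
-- stated objective: alternative
-- what changed: Replaces the two per-pair scans over agents (any(>) then all(>=)) by one pass per pair that tracks saw_greater/saw_less flags and breaks out as soon as both are set.
-- outside the precondition, e.g. on check_ido([[1, 0, 9], [0, 1]]): A returns (False, (0, 1)), B returns (False, (0, 1))
import Mathlib
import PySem

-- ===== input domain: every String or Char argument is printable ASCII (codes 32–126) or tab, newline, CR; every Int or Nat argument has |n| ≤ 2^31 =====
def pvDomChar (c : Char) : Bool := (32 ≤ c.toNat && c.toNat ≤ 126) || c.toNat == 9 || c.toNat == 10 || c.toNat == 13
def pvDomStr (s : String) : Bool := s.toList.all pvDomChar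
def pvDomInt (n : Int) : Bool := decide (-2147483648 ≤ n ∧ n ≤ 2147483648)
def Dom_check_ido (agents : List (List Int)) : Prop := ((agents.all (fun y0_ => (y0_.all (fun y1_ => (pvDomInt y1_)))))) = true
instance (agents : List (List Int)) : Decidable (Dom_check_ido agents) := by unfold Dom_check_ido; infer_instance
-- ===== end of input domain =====

-- B replaces A's two per-pair scans over agents (any(>) then all(>=)) by one
-- flag-tracking pass per pair with early exit; same first violating pair.


-- ===== PORT A =====
-- any(agent[i] > agent[j] for agent in agents)
def anyGtA (agents : List (List Int)) (i j : Nat) : Bool :=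
  agents.any (fun agent => decide (agent.getD i 0 > agent.getD j 0))

-- all(agent[i] >= agent[j] for agent in agents)
def allGeA (agents : List (List Int)) (i j : Nat) : Bool :=
  agents.all (fun agent => decide (agent.getD i 0 ≥ agent.getD j 0))

-- the two nested for-loops with early return, as findSome? over the ranges
def check_ido (agents : List (List Int)) : Bool × (Option (Int × Int)) :=
  let num_items := (agents.headD []).length
  match (List.range num_items).findSome? (fun i =>
      ((List.range num_items).drop (i + 1)).findSome? (fun j =>
        if anyGtA agents i j then
          (if !allGeA agents i j then some ((i : Int), (j : Int)) else none)
        else none)) with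
  | some p => (false, some p)
  | none => (true, none)

-- ===== PORT B =====
-- the per-pair flag loop over agents: returns true iff both flags get set
def flagsB (agents : List (List Int)) (i j : Nat) (sg sl : Bool) : Bool :=
  match agents with
  | [] => false
  | agent :: rest =>
    let sg' := sg || decide (agent.getD i 0 > agent.getD j 0)
    let sl' := sl || decide (agent.getD i 0 < agent.getD j 0)
    if sg' && sl' then true else flagsB rest i j sg' sl'

def innerB (agents : List (List Int)) (i : Nat) (js : List Nat) : Option (Int × Int) :=
  match js with
  | [] => none
  | j :: js' =>
    if flagsB agents i j false false then some ((i : Int), (j : Int))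
    else innerB agents i js'

def outerB (agents : List (List Int)) (n : Nat) (is_ : List Nat) : Option (Int × Int) :=
  match is_ with
  | [] => none
  | i :: is' =>
    match innerB agents i ((List.range n).drop (i + 1)) with
    | some p => some p
    | none => outerB agents n is'

def check_ido_alt (agents : List (List Int)) : Bool × (Option (Int × Int)) :=
  let num_items := (agents.headD []).length
  match outerB agents num_items (List.range num_items) with
  | some p => (false, some p)
  | none => (true, none)

-- ===== PRECONDITION & SPEC =====
-- Pre_ excludes the inputs where Python A's indexing can raise IndexError: empty
-- agents, and (when there are at least two items) some agent shorter than agents[0];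
-- this also excludes ragged inputs on which A happens to return before reaching the
-- missing index (both programs agree there, see the cite).
def Pre_check_ido (agents : List (List Int)) : Prop :=
  agents ≠ [] ∧ (2 ≤ (agents.headD []).length →
    ∀ ag ∈ agents, (agents.headD []).length ≤ ag.length)
instance (agents : List (List Int)) : Decidable (Pre_check_ido agents) := by
  unfold Pre_check_ido; infer_instance

def pvWitness_check_ido : List (List Int) := [[1, 2], [2, 1]]

def Spec_check_ido (agents : List (List Int)) (out : Bool × (Option (Int × Int))) : Prop := out = check_ido_alt agents
instance (agents : List (List Int)) (out : Bool × (Option (Int × Int))) : Decidable (Spec_check_ido agents out) := by unfold Spec_check_ido; infer_instance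

-- ===== CLAIM (what is proved, stated in full; the proofs are below) =====
def Claim_equal_check_ido : Prop := ∀ (agents : List (List Int)), Dom_check_ido agents → Pre_check_ido agents → Spec_check_ido agents (check_ido agents)

-- ===== LEMMAS AND PROOFS =====

-- the flag loop computes: (sg ∨ some agent has i>j) ∧ (sl ∨ some agent has i<j),
-- provided the flags do not start out both set
theorem flagsB_eq (i j : Nat) :
    ∀ (agents : List (List Int)) (sg sl : Bool), (sg && sl) = false →
      flagsB agents i j sg sl =
      ((sg || agents.any (fun ag => decide (ag.getD i 0 > ag.getD j 0))) &&
       (sl || agents.any (fun ag => decide (ag.getD i 0 < ag.getD j 0)))) := by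
  intro agents
  induction agents with
  | nil => intro sg sl h; cases sg <;> cases sl <;> simp_all [flagsB]
  | cons agent rest ih =>
    intro sg sl _
    simp only [flagsB, List.any_cons]
    split_ifs with hb
    · rw [Bool.and_eq_true] at hb
      rcases hb with ⟨h1, h2⟩
      rw [← Bool.or_assoc, h1, ← Bool.or_assoc, h2]
      simp
    · rw [ih _ _ (Bool.eq_false_iff.mpr hb)]
      simp [Bool.or_assoc]

-- not all(agent[i] >= agent[j]) is exactly any(agent[i] < agent[j])
theorem notAllGe (agents : List (List Int)) (i j : Nat) :
    (!allGeA agents i j) = agents.any (fun ag => decide (ag.getD i 0 < ag.getD j 0)) := by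
  induction agents with
  | nil => simp [allGeA]
  | cons a rest ih =>
    simp only [allGeA, List.all_cons, List.any_cons, Bool.not_and] at *
    rw [ih]
    congr 1
    simp [← decide_not]

-- the per-pair tests of A and B agree
theorem pair_eq (agents : List (List Int)) (i j : Nat) :
    flagsB agents i j false false = (anyGtA agents i j && !allGeA agents i j) := by
  rw [flagsB_eq i j agents false false rfl, notAllGe]
  simp [anyGtA]

theorem innerB_eq (agents : List (List Int)) (i : Nat) (js : List Nat) :
    innerB agents i js = js.findSome? (fun j =>
      if anyGtA agents i j then
        (if !allGeA agents i j then some ((i : Int), (j : Int)) else none)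
      else none) := by
  induction js with
  | nil => rfl
  | cons j js' ih =>
    simp only [innerB, List.findSome?_cons, pair_eq]
    by_cases hg : anyGtA agents i j <;> by_cases ha : allGeA agents i j <;>
      simp [hg, ha, ih]

theorem outerB_eq (agents : List (List Int)) (n : Nat) (is_ : List Nat) :
    outerB agents n is_ = is_.findSome? (fun i =>
      ((List.range n).drop (i + 1)).findSome? (fun j =>
        if anyGtA agents i j then
          (if !allGeA agents i j then some ((i : Int), (j : Int)) else none)
        else none)) := by
  induction is_ with
  | nil => rfl
  | cons i is' ih =>
    simp only [outerB, List.findSome?_cons, innerB_eq, ih]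
    rcases h : List.findSome? (fun j =>
        if anyGtA agents i j then
          (if !allGeA agents i j then some ((i : Int), (j : Int)) else none)
        else none) ((List.range n).drop (i + 1)) with _ | p <;> simp

-- ===== VERDICT (by name: the statement is the Claim_ definition above) =====
theorem check_ido_spec : Claim_equal_check_ido := by
  intro agents _ _
  unfold Spec_check_ido check_ido check_ido_alt
  simp only [outerB_eq]
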